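-- pv_equiv track=rewrite | github.com/keijak/comp-pub | abc161/d.py | search
-- ===== SOURCE A (Python) =====
-- def search(d, digits, count):
--     if d == 1:
--         return (digits if count == 1 else None), (count-1)
--     s = digits[-1]
--     for i in range(max(s-1, 0), min(s+2, 10)):
--         answer, count = search(d-1, digits + [i], count)
--         if answer:
--              return answer, count
--     return None, count
-- ===== SOURCE B (Python) =====
-- def search(d, digits, count):
--     # Skip-count descent: precompute subtree leaf counts per (depth,last-digit),
--     # then walk straight to the count-th leaf instead of enumerating leaves.
--     if d == 1:
--         return (digits if count == 1 else None), count - 1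
--     s = digits[-1]
--     if max(s - 1, 0) >= min(s + 2, 10):   # no neighbouring digits: no chain of length d exists
--         return None, count
--     # cnt[k][v] = number of leaves of the subtree rooted at last digit v with k+1 levels
--     cnt = [[1] * 10]
--     for _ in range(d - 2):
--         prev = cnt[-1]
--         cnt.append([sum(prev[j] for j in range(max(v - 1, 0), min(v + 2, 10)))
--                     for v in range(10)])
--     path = list(digits)
--     remaining = count
--     for level in range(d, 1, -1):
--         chosen = None
--         for i in range(max(s - 1, 0), min(s + 2, 10)):
--             c = cnt[level - 2][i]
--             if 1 <= remaining <= c: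
--                 chosen = i
--                 break
--             remaining -= c
--         if chosen is None:
--             return None, remaining
--         path.append(chosen)
--         s = chosen
--     return path, remaining - 1
-- ===== Notes on version B (the rewrite author's own statement) =====
-- stated objective: alternative
-- what changed: Replaces the DFS that decrements the counter once per visited leaf with a DP table of subtree leaf counts (depth x last digit) and a direct descent that skips whole subtrees to locate the count-th leaf.
-- outside the precondition, e.g. on search(2, [], 1): A raises IndexError, B raises IndexError; on search(0, [1], 1): A raises RecursionError, B returns ([1], 0)
import Mathlib
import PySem

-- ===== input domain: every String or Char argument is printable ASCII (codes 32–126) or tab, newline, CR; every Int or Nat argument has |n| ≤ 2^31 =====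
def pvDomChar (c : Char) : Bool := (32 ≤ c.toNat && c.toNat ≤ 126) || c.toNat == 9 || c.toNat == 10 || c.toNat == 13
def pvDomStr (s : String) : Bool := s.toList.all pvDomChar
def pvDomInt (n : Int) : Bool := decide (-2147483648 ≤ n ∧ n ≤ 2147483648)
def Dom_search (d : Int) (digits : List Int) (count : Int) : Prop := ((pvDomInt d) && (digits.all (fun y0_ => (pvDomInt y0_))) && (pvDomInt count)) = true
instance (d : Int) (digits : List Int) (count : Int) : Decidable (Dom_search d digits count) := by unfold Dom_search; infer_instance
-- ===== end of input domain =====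

-- B locates the count-th leaf directly by precomputed subtree leaf counts (skip-count descent)
-- instead of A's leaf-by-leaf DFS countdown: a different algorithm, not claimed faster.

-- ===== PORT A =====
-- A's recursion, fuelled by d.toNat (the Python recursion depth is exactly d levels);
-- fuel 0 is reached only for d ≤ 0, where Python A never returns (excluded by Pre_search).
mutual
def searchAuxA : Nat → Int → List Int → Int → Option (List Int) × Int
  | 0, _, _, count => (none, count)
  | fuel+1, d, digits, count =>
    if d = 1 then ((if count = 1 then some digits else none), count - 1)
    else
      match PySem.List.pyGet? digits (-1) with
      | none => (none, count)   -- Python raises IndexError here; excluded by Pre_search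
      | some s => searchLoopA fuel (d-1) digits count (PySem.List.pyRange (max (s-1) 0) (min (s+2) 10) 1)
  termination_by fuel _ _ _ => (fuel, 0)
  decreasing_by
    · exact Prod.Lex.left _ _ (by omega)

def searchLoopA : Nat → Int → List Int → Int → List Int → Option (List Int) × Int
  | _, _, _, count, [] => (none, count)
  | fuel, d1, digits, count, i :: rest =>
    match searchAuxA fuel d1 (digits ++ [i]) count with
    | (some (x :: xs), count') => (some (x :: xs), count')   -- Python: if answer (truthy)
    | (_, count') => searchLoopA fuel d1 digits count' rest
  termination_by fuel _ _ _ l => (fuel, l.length + 1)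
  decreasing_by
    · exact Prod.Lex.right _ (by omega)
    · exact Prod.Lex.right _ (by simp only [List.length_cons]; omega)
end

def search (d : Int) (digits : List Int) (count : Int) : Option (List Int) × Int :=
  searchAuxA d.toNat d digits count

-- ===== PORT B =====
def buildRowB (prev : List Int) : List Int :=
  (PySem.List.pyRange 0 10 1).map (fun v =>
    ((PySem.List.pyRange (max (v-1) 0) (min (v+2) 10) 1).map
       (fun j => PySem.List.pyGetD prev j 0)).sum)

def buildTableB (d : Int) : List (List Int) :=
  (PySem.List.pyRange 0 (d-2) 1).foldl
    (fun cnt _ => cnt ++ [buildRowB (PySem.List.pyGetD cnt (-1) [])])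
    [List.replicate 10 1]

def walkInnerB (cnt : List (List Int)) (level : Int) : Int → List Int → Option Int × Int
  | remaining, [] => (none, remaining)
  | remaining, i :: rest =>
    let c := PySem.List.pyGetD (PySem.List.pyGetD cnt (level-2) []) i 0
    if 1 ≤ remaining ∧ remaining ≤ c then (some i, remaining)
    else walkInnerB cnt level (remaining - c) rest

def walkOuterB (cnt : List (List Int)) : List Int → Int → Int → List Int → Option (List Int) × Int
  | path, remaining, _, [] => (some path, remaining - 1)
  | path, remaining, s, level :: rest =>
    match walkInnerB cnt level remaining (PySem.List.pyRange (max (s-1) 0) (min (s+2) 10) 1) with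
    | (none, r) => (none, r)
    | (some i, r) => walkOuterB cnt (path ++ [i]) r i rest

def search_alt (d : Int) (digits : List Int) (count : Int) : Option (List Int) × Int :=
  if d = 1 then ((if count = 1 then some digits else none), count - 1)
  else
    match PySem.List.pyGet? digits (-1) with
    | none => (none, count)   -- Python raises IndexError here; excluded by Pre_search
    | some s =>
      if max (s-1) 0 ≥ min (s+2) 10 then (none, count)
      else
        let cnt := buildTableB d
        walkOuterB cnt digits count s (PySem.List.pyRange d 1 (-1))

-- ===== PRECONDITION & SPEC =====
-- lastDigit digits = digits[-1] (0 if empty); used by Pre_ to state the dead-end case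
def lastDigit (dg : List Int) : Int := dg.getLast?.getD 0

-- Pre_ excludes exactly the inputs on which Python A raises: digits = [] with d ≠ 1
-- (IndexError), and extendable inputs (d ≠ 1, last digit in -1..10, so the neighbour loop
-- recurses) with d ≤ 0 (the recursion never reaches the d = 1 base case: RecursionError at
-- any limit) or d > 1000 (the recursion depth is exactly d, which exceeds CPython's default
-- recursion limit of 1000: RecursionError; an interpreter run with a raised limit still
-- returns for d somewhat above 1000, and B returns the same value there — see cites).
def Pre_search (d : Int) (digits : List Int) (count : Int) : Prop :=
  (1 ≤ d ∧ d ≤ 1000 ∧ (d = 1 ∨ digits ≠ [])) ∨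
  (d ≠ 1 ∧ digits ≠ [] ∧ (lastDigit digits ≤ -2 ∨ 11 ≤ lastDigit digits))
instance (d : Int) (digits : List Int) (count : Int) : Decidable (Pre_search d digits count) := by
  unfold Pre_search; infer_instance

def pvWitness_search : Int × List Int × Int := (3, [1], 2)

def Spec_search (d : Int) (digits : List Int) (count : Int) (out : Option (List Int) × Int) : Prop := out = search_alt d digits count
instance (d : Int) (digits : List Int) (count : Int) (out : Option (List Int) × Int) : Decidable (Spec_search d digits count out) := by unfold Spec_search; infer_instance

-- ===== CLAIM (what is proved, stated in full; the proofs are below) =====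
def Claim_equal_search : Prop := ∀ (d : Int) (digits : List Int) (count : Int), Dom_search d digits count → Pre_search d digits count → Spec_search d digits count (search d digits count)

-- ===== LEMMAS AND PROOFS =====

-- reference objects: neighbour digits, subtree leaf counts, and the skip-descent
def nbrs (v : Int) : List Int := PySem.List.pyRange (max (v-1) 0) (min (v+2) 10) 1

def Tf : Nat → Int → Int
  | 0, _ => 1
  | n+1, v => ((nbrs v).map (Tf n)).sum

def lastD (dg : List Int) : Int := lastDigit dg

mutual
def descend : Nat → List Int → Int → List Int
  | 0, dg, _ => dg
  | k+1, dg, c => descendGo k dg c (nbrs (lastD dg))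
  termination_by k _ _ => (k, 0)
  decreasing_by
    · exact Prod.Lex.left _ _ (by omega)

def descendGo : Nat → List Int → Int → List Int → List Int
  | _, dg, _, [] => dg
  | k, dg, c, i :: rest =>
    if 1 ≤ c ∧ c ≤ Tf k i then descend k (dg ++ [i]) c else descendGo k dg (c - Tf k i) rest
  termination_by k _ _ l => (k, l.length + 1)
  decreasing_by
    · exact Prod.Lex.right _ (by omega)
    · exact Prod.Lex.right _ (by simp only [List.length_cons]; omega)
end

-- common closed form of both programs at depth n+? : depth index n means "n more digits to add"
def specFn (n : Nat) (dg : List Int) (c : Int) : Option (List Int) × Int :=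
  if 1 ≤ c ∧ c ≤ Tf n (lastD dg) then (some (descend n dg c), 0)
  else (none, c - Tf n (lastD dg))

def loopSpec (n : Nat) (dg : List Int) : List Int → Int → Option (List Int) × Int
  | [], c => (none, c)
  | i :: cs, c =>
    if 1 ≤ c ∧ c ≤ Tf n i then (some (descend n (dg ++ [i]) c), 0)
    else loopSpec n dg cs (c - Tf n i)

def pickSpec (n : Nat) : List Int → Int → Option Int × Int
  | [], c => (none, c)
  | i :: cs, c => if 1 ≤ c ∧ c ≤ Tf n i then (some i, c) else pickSpec n cs (c - Tf n i)

def rowsN : Nat → List Int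
  | 0 => List.replicate 10 1
  | k+1 => buildRowB (rowsN k)

theorem mem_nbrs {i v : Int} (h : i ∈ nbrs v) : 0 ≤ i ∧ i ≤ 9 := by
  unfold nbrs at h
  rw [PySem.List.mem_pyRange_one] at h
  omega

theorem Tf_nonneg (n : Nat) (v : Int) : 0 ≤ Tf n v := by
  induction n generalizing v with
  | zero => simp [Tf]
  | succ n ih =>
    simp only [Tf]
    exact List.sum_nonneg (by intro x hx; obtain ⟨j, _, rfl⟩ := List.mem_map.mp hx; exact ih j)

theorem descend_ne_nil : ∀ (n : Nat) (dg : List Int) (c : Int), dg ≠ [] → descend n dg c ≠ [] := by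
  intro n
  induction n with
  | zero => intro dg c h; simpa [descend] using h
  | succ n ih =>
    have go : ∀ (cs : List Int) (dg : List Int) (c : Int), dg ≠ [] → descendGo n dg c cs ≠ [] := by
      intro cs
      induction cs with
      | nil => intro dg c h; simpa [descendGo] using h
      | cons i rest ihc =>
        intro dg c h
        simp only [descendGo]
        split
        · exact ih (dg ++ [i]) c (by simp)
        · exact ihc dg (c - Tf n i) h
    intro dg c h
    simp only [descend]
    exact go _ dg c h

theorem lastD_concat (dg : List Int) (i : Int) : lastD (dg ++ [i]) = i := by
  simp [lastD, lastDigit]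

theorem pyGet?_last {dg : List Int} (h : dg ≠ []) :
    PySem.List.pyGet? dg (-1) = some (lastD dg) := by
  rw [PySem.List.pyGet?_neg_one]
  cases hl : dg.getLast? with
  | none => exact absurd (List.getLast?_eq_none_iff.mp hl) h
  | some l => simp [lastD, lastDigit, hl]

-- ---- A-side characterisation ----

theorem loopA_eq (n fuel : Nat) (dg : List Int)
    (IH : ∀ (dg' : List Int) (c' : Int), dg' ≠ [] →
      searchAuxA fuel ((n : Int) + 1) dg' c' = specFn n dg' c') :
    ∀ (cs : List Int) (c : Int), searchLoopA fuel ((n : Int) + 1) dg c cs = loopSpec n dg cs c := by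
  intro cs
  induction cs with
  | nil => intro c; simp [searchLoopA, loopSpec]
  | cons i rest ihc =>
    intro c
    rw [searchLoopA, IH (dg ++ [i]) c (by simp), loopSpec]
    unfold specFn
    rw [lastD_concat]
    by_cases h : 1 ≤ c ∧ c ≤ Tf n i
    · rw [if_pos h, if_pos h]
      rcases hd : descend n (dg ++ [i]) c with _ | ⟨x, xs⟩
      · exact absurd hd (descend_ne_nil n (dg ++ [i]) c (by simp))
      · rfl
    · rw [if_neg h, if_neg h]
      exact ihc (c - Tf n i)

theorem loopSpec_spec (n : Nat) (dg : List Int) :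
    ∀ (cs : List Int) (c : Int),
      loopSpec n dg cs c =
        if 1 ≤ c ∧ c ≤ (cs.map (Tf n)).sum then (some (descendGo n dg c cs), 0)
        else (none, c - (cs.map (Tf n)).sum) := by
  intro cs
  induction cs with
  | nil =>
    intro c
    simp only [loopSpec, descendGo, List.map_nil, List.sum_nil]
    rw [if_neg (by omega)]
    simp
  | cons i rest ihc =>
    intro c
    have ht := Tf_nonneg n i
    have hr : 0 ≤ (rest.map (Tf n)).sum :=
      List.sum_nonneg (by intro x hx; obtain ⟨j, _, rfl⟩ := List.mem_map.mp hx; exact Tf_nonneg n j)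
    rw [loopSpec, ihc]
    simp only [List.map_cons, List.sum_cons, descendGo]
    split_ifs with h1 h2 h3 h4 <;> first
      | rfl
      | (exfalso; omega)
      | (congr 1; omega)

theorem auxA_eq_spec : ∀ (n fuel : Nat) (dg : List Int) (c : Int), dg ≠ [] → n < fuel →
    searchAuxA fuel ((n : Int) + 1) dg c = specFn n dg c := by
  intro n
  induction n with
  | zero =>
    intro fuel dg c hdg hf
    obtain ⟨f, rfl⟩ : ∃ f, fuel = f + 1 := ⟨fuel - 1, by omega⟩
    simp only [searchAuxA, specFn, Tf, descend, Nat.cast_zero, zero_add]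
    split_ifs with h1 h2 h3 <;> first | (simp; omega) | omega | simp
  | succ n ih =>
    intro fuel dg c hdg hf
    obtain ⟨f, rfl⟩ : ∃ f, fuel = f + 1 := ⟨fuel - 1, by omega⟩
    have hd1 : ((n : Int) + 1 + 1) ≠ 1 := by omega
    rw [searchAuxA]
    simp only [Nat.cast_add, Nat.cast_one]
    rw [if_neg hd1, pyGet?_last hdg]
    have harg : ((n : Int) + 1 + 1) - 1 = (n : Int) + 1 := by ring
    rw [harg]
    have IH : ∀ (dg' : List Int) (c' : Int), dg' ≠ [] →
        searchAuxA f ((n : Int) + 1) dg' c' = specFn n dg' c' := by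
      intro dg' c' h; exact ih f dg' c' h (by omega)
    show searchLoopA f ((n : Int) + 1) dg c
        (PySem.List.pyRange (max (lastD dg - 1) 0) (min (lastD dg + 2) 10) 1) = specFn (n + 1) dg c
    rw [loopA_eq n f dg IH, loopSpec_spec]
    simp only [specFn, Tf, descend]
    rfl

-- ---- B-side characterisation ----

theorem rowsN_eq : ∀ (k : Nat), rowsN k = (PySem.List.pyRange 0 10 1).map (Tf k) := by
  intro k
  induction k with
  | zero =>
    simp only [rowsN]
    decide
  | succ k ih =>
    simp only [rowsN, buildRowB, ih]
    apply List.map_congr_left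
    intro v hv
    rw [PySem.List.mem_pyRange_one] at hv
    show ((nbrs v).map fun j => PySem.List.pyGetD ((PySem.List.pyRange 0 10 1).map (Tf k)) j 0).sum = _
    rw [Tf]
    congr 1
    apply List.map_congr_left
    intro j hj
    obtain ⟨hj0, hj9⟩ := mem_nbrs hj
    exact PySem.List.pyGetD_map_pyRange_of_nonneg (Tf k) 10 j 0 hj0 (by omega)

theorem buildTableB_eq {d : Int} (hd : 2 ≤ d) :
    buildTableB d = (List.range (d - 1).toNat).map rowsN := by
  have step : ∀ (l : List Int) (m : Nat),
      l.foldl (fun cnt _ => cnt ++ [buildRowB (PySem.List.pyGetD cnt (-1) [])])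
        ((List.range (m + 1)).map rowsN)
      = (List.range (m + 1 + l.length)).map rowsN := by
    intro l
    induction l with
    | nil => intro m; simp
    | cons x xs ihl =>
      intro m
      have hne : (List.range (m + 1)).map rowsN ≠ [] := by simp
      have hlast : PySem.List.pyGetD ((List.range (m + 1)).map rowsN) (-1) [] = rowsN m := by
        rw [PySem.List.pyGetD_neg_one _ _ hne]
        rw [List.getLast_eq_getElem]
        simp
      rw [List.foldl_cons, hlast]
      have hstep : (List.range (m + 1)).map rowsN ++ [buildRowB (rowsN m)]
           = (List.range (m + 1 + 1)).map rowsN := by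
        conv_rhs => rw [List.range_succ]
        rw [List.map_append]
        rfl
      rw [hstep, ihl (m + 1)]
      simp only [List.length_cons]
      congr 2
      omega
  have hinit : [List.replicate (10:Nat) (1:Int)] = (List.range 1).map rowsN := by
    simp [rowsN]
  unfold buildTableB
  rw [hinit, step]
  congr 2
  rw [PySem.List.length_pyRange_one]
  omega


theorem tableGet {d : Int} (hd : 2 ≤ d) (k : Nat) (hk : (k : Int) ≤ d - 2)
    {j : Int} (hj0 : 0 ≤ j) (hj9 : j ≤ 9) :
    PySem.List.pyGetD (PySem.List.pyGetD (buildTableB d) (k : Int) []) j 0 = Tf k j := by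
  rw [buildTableB_eq hd]
  rw [PySem.List.pyGetD_natCast]
  have hk' : k < (d - 1).toNat := by omega
  rw [List.getD_eq_getElem?_getD]
  rw [List.getElem?_map]
  simp only [List.getElem?_range hk']
  simp only [Option.map_some, Option.getD_some]
  rw [rowsN_eq]
  exact PySem.List.pyGetD_map_pyRange_of_nonneg (Tf k) 10 j 0 hj0 (by omega)

theorem walkInner_eq {d : Int} (hd : 2 ≤ d) (n : Nat) (hn : (n : Int) ≤ d - 2) :
    ∀ (cs : List Int) (c : Int), (∀ i ∈ cs, 0 ≤ i ∧ i ≤ 9) →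
      walkInnerB (buildTableB d) ((n : Int) + 2) c cs = pickSpec n cs c := by
  intro cs
  induction cs with
  | nil => intro c _; simp [walkInnerB, pickSpec]
  | cons i rest ihc =>
    intro c hb
    obtain ⟨hi0, hi9⟩ := hb i (List.mem_cons_self ..)
    rw [walkInnerB, pickSpec]
    have hidx : ((n : Int) + 2) - 2 = (n : Int) := by ring
    rw [hidx, tableGet hd n hn hi0 hi9]
    split
    · rfl
    · exact ihc (c - Tf n i) (fun j hj => hb j (List.mem_cons_of_mem _ hj))

theorem pickSpec_none (n : Nat) :
    ∀ (cs : List Int) (c : Int), ¬(1 ≤ c ∧ c ≤ (cs.map (Tf n)).sum) →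
      pickSpec n cs c = (none, c - (cs.map (Tf n)).sum) := by
  intro cs
  induction cs with
  | nil => intro c _; simp [pickSpec]
  | cons i rest ihc =>
    intro c h
    have ht := Tf_nonneg n i
    have hr : 0 ≤ (rest.map (Tf n)).sum :=
      List.sum_nonneg (by intro x hx; obtain ⟨j, _, rfl⟩ := List.mem_map.mp hx; exact Tf_nonneg n j)
    simp only [List.map_cons, List.sum_cons] at h ⊢
    rw [pickSpec, if_neg (by omega)]
    rw [ihc (c - Tf n i) (by omega)]
    congr 1
    omega

theorem walkOuter_found {d : Int} (hd : 2 ≤ d) :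
    ∀ (m : Nat), (m : Int) ≤ d - 1 →
      ∀ (dg : List Int) (c : Int), dg ≠ [] → 1 ≤ c → c ≤ Tf m (lastD dg) →
        walkOuterB (buildTableB d) dg c (lastD dg) (PySem.List.pyRange ((m : Int) + 1) 1 (-1))
          = (some (descend m dg c), 0) := by
  intro m
  induction m with
  | zero =>
    intro _ dg c _ h1 h2
    rw [PySem.List.pyRange_neg_one_eq_nil (by omega)]
    simp only [Tf] at h2
    have hc : c = 1 := by omega
    subst hc
    simp [walkOuterB, descend]
  | succ m ih =>
    intro hm dg c hdg h1 h2
    simp only [Nat.cast_add, Nat.cast_one] at hm ⊢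
    rw [PySem.List.pyRange_neg_one_cons (by omega)]
    rw [walkOuterB]
    have hlev : ((m : Int) + 1 + 1) = ((m : Int) + 2) := by ring
    rw [hlev, walkInner_eq hd m (by omega)
      (PySem.List.pyRange (max (lastD dg - 1) 0) (min (lastD dg + 2) 10) 1) c
      (fun i hi => mem_nbrs hi)]
    have harg : ((m : Int) + 2) - 1 = (m : Int) + 1 := by ring
    rw [harg]
    simp only [Tf] at h2
    -- fused scan over the neighbour list
    have fused : ∀ (cs : List Int) (c' : Int), (∀ i ∈ cs, 0 ≤ i ∧ i ≤ 9) →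
        1 ≤ c' → c' ≤ (cs.map (Tf m)).sum →
        (match pickSpec m cs c' with
         | (none, r) => (none, r)
         | (some i, r) =>
             walkOuterB (buildTableB d) (dg ++ [i]) r i (PySem.List.pyRange ((m : Int) + 1) 1 (-1)))
          = ((some (descendGo m dg c' cs), 0) : Option (List Int) × Int) := by
      intro cs
      induction cs with
      | nil => intro c' _ hc1 hc2; simp at hc2; omega
      | cons i rest ihc =>
        intro c' hb hc1 hc2
        obtain ⟨hi0, hi9⟩ := hb i (List.mem_cons_self ..)
        rw [pickSpec, descendGo]
        split_ifs with h
        · have := ih (by omega) (dg ++ [i]) c' (by simp) h.1 (by rw [lastD_concat]; exact h.2)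
          rw [lastD_concat] at this
          simpa using this
        · have ht := Tf_nonneg m i
          simp only [List.map_cons, List.sum_cons] at hc2
          exact ihc (c' - Tf m i) (fun j hj => hb j (List.mem_cons_of_mem _ hj)) (by omega) (by omega)
    have := fused (nbrs (lastD dg)) c (fun i hi => mem_nbrs hi) h1 h2
    rw [descend]
    exact this

theorem search_alt_eq_spec {d : Int} (hd : 2 ≤ d) (dg : List Int) (c : Int) (hdg : dg ≠ []) :
    search_alt d dg c = specFn (d - 1).toNat dg c := by
  obtain ⟨m, hm⟩ : ∃ m : Nat, (d - 1).toNat = m + 1 := ⟨(d - 1).toNat - 1, by omega⟩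
  have hdm : d = (m : Int) + 2 := by omega
  rw [search_alt, if_neg (by omega), pyGet?_last hdg]
  simp only []
  rw [hm]
  by_cases hdead : max (lastD dg - 1) 0 ≥ min (lastD dg + 2) 10
  · rw [if_pos hdead]
    have hnil : nbrs (lastD dg) = [] := PySem.List.pyRange_one_eq_nil (by omega)
    have hTf : Tf (m + 1) (lastD dg) = 0 := by
      simp only [Tf]
      rw [hnil]
      simp
    rw [specFn, hTf, if_neg (by omega)]
    simp
  rw [if_neg hdead]
  by_cases h : 1 ≤ c ∧ c ≤ Tf (m + 1) (lastD dg)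
  · have hw := walkOuter_found hd (m + 1) (by push_cast; omega) dg c hdg h.1 h.2
    push_cast at hw
    rw [show (m : Int) + 1 + 1 = d by omega] at hw
    rw [specFn, if_pos h]
    exact hw
  · rw [specFn, if_neg h]
    rw [PySem.List.pyRange_neg_one_cons (by omega)]
    rw [walkOuterB]
    subst hdm
    have hwi := walkInner_eq (d := (m : Int) + 2) (by omega) m (by omega)
      (PySem.List.pyRange (max (lastD dg - 1) 0) (min (lastD dg + 2) 10) 1) c
      (fun i hi => mem_nbrs hi)
    simp only [hwi]
    rw [pickSpec_none m _ c
      (by rw [show ((PySem.List.pyRange (max (lastD dg - 1) 0) (min (lastD dg + 2) 10) 1).map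
                 (Tf m)).sum = Tf (m + 1) (lastD dg) from rfl]; exact h)]
    rw [show ((PySem.List.pyRange (max (lastD dg - 1) 0) (min (lastD dg + 2) 10) 1).map
          (Tf m)).sum = Tf (m + 1) (lastD dg) from rfl]

theorem search_eq_spec {d : Int} (hd : 2 ≤ d) (dg : List Int) (c : Int) (hdg : dg ≠ []) :
    search d dg c = specFn (d - 1).toNat dg c := by
  obtain ⟨m, hm⟩ : ∃ m : Nat, (d - 1).toNat = m + 1 := ⟨(d - 1).toNat - 1, by omega⟩
  have h1 : d = ((m + 1 : Nat) : Int) + 1 := by omega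
  have h2 : d.toNat = m + 2 := by omega
  rw [search, h2, hm]
  rw [show d = ((m + 1 : Nat) : Int) + 1 from h1]
  exact auxA_eq_spec (m + 1) (m + 2) dg c hdg (by omega)

theorem nbrs_dead {l : Int} (h : l ≤ -2 ∨ 11 ≤ l) : nbrs l = [] :=
  PySem.List.pyRange_one_eq_nil (by omega)

theorem search_dead {d : Int} (hd : d ≠ 1) (dg : List Int) (c : Int) (hdg : dg ≠ [])
    (hnil : nbrs (lastD dg) = []) : search d dg c = (none, c) := by
  by_cases hle : d ≤ 0
  · rw [search, show d.toNat = 0 by omega, searchAuxA]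
  · obtain ⟨m, hm⟩ : ∃ m : Nat, d.toNat = m + 1 := ⟨d.toNat - 1, by omega⟩
    rw [search, hm, searchAuxA, if_neg hd, pyGet?_last hdg]
    show searchLoopA m (d - 1) dg c (nbrs (lastD dg)) = (none, c)
    rw [hnil, searchLoopA]

theorem search_alt_dead {d : Int} (hd : d ≠ 1) (dg : List Int) (c : Int) (hdg : dg ≠ [])
    (hnil : nbrs (lastD dg) = []) : search_alt d dg c = (none, c) := by
  have hge : min (lastD dg + 2) 10 ≤ max (lastD dg - 1) 0 := by
    by_contra hlt
    unfold nbrs at hnil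
    rw [PySem.List.pyRange_one_cons (by omega)] at hnil
    exact List.cons_ne_nil _ _ hnil
  rw [search_alt, if_neg hd, pyGet?_last hdg]
  show (if max (lastD dg - 1) 0 ≥ min (lastD dg + 2) 10 then ((none : Option (List Int)), c)
        else _) = (none, c)
  rw [if_pos (by omega)]

-- ===== VERDICT (by name: the statement is the Claim_ definition above) =====
theorem search_spec : Claim_equal_search := by
  intro d digits count _ hpre
  unfold Spec_search
  by_cases h1 : d = 1
  · subst h1
    simp [search, search_alt, searchAuxA]
  · rcases hpre with ⟨hd1, _, hcase⟩ | ⟨_, hdg, hlast⟩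
    · have hd2 : 2 ≤ d := by omega
      have hdg : digits ≠ [] := by rcases hcase with h' | h' <;> [omega; exact h']
      rw [search_eq_spec hd2 digits count hdg, search_alt_eq_spec hd2 digits count hdg]
    · have hnil : nbrs (lastD digits) = [] := nbrs_dead hlast
      rw [search_dead h1 digits count hdg hnil, search_alt_dead h1 digits count hdg hnil]
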